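-- pv_equiv track=rewrite | github.com/giant-steps/algorithms_work | old_hw/hw1/prog1_.py | cleave
-- ===== SOURCE A (Python) =====
-- def cleave(arg1):   ## will find putative cleavage sites, dict from translate() as input
--     new_keys = {}
--     for key in arg1:
--         text = arg1[key]
--         count = 0
--         sites = []
--         while count < len(text):
--             if text[count:(count+2)] == 'KK' or text[count:(count+2)] == 'KH' or text[count:(count+2)] == 'KR' or text[count:(count+2)] == 'HK' or text[count:(count+2)] == 'HH' or text[count:(count+2)] == 'HR' or text[count:(count+2)] == 'RK' or text[count:(count+2)] == 'RH' or text[count:(count+2)] == 'RR':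
--                 sites.append(count)
--             count += 1
--
--         new_keys[key] = key + ' ' + str(sites)
--
--     return new_keys
-- ===== SOURCE B (Python) =====
-- def cleave(arg1):   ## will find putative cleavage sites, dict from translate() as input
--     new_keys = {}
--     for key, text in arg1.items():
--         basic = [i for i, c in enumerate(text) if c in 'KHR']
--         sites = [p for p, q in zip(basic, basic[1:]) if q == p + 1]
--         new_keys[key] = key + ' ' + str(sites)
--     return new_keys
-- ===== Notes on version B (the rewrite author's own statement) =====
-- stated objective: faster
-- what changed: A scans every index and compares the fresh slice text[i:i+2] against nine dipeptide string literals; B is a staged algorithm on a derived data structure: it first extracts the list of positions of basic residues (c in 'KHR'), then reports a site wherever two entries of that position list are consecutive integers (q == p+1), so the dipeptide test never slices the sequence text at all.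
import Mathlib
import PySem

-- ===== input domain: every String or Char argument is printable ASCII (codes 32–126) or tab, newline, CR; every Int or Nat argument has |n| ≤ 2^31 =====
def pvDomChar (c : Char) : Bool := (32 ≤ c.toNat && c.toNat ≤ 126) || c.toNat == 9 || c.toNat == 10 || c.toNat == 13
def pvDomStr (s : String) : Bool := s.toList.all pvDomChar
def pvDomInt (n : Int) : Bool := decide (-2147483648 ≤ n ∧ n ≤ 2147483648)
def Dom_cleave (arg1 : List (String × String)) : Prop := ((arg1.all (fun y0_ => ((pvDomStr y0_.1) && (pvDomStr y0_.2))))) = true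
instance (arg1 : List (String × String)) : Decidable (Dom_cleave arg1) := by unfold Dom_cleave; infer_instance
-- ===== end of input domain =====

-- B replaces A's index loop with its nine slice-vs-literal comparisons by a staged algorithm:
-- first the list of positions of basic residues is extracted, then sites are read off that
-- position list wherever two entries are consecutive integers; objective: faster (constant factor,
-- measured: no per-index slicing and nine comparisons).

-- ===== PORT A =====
-- shared input shim for both ports: the dict argument (Python dict: insertion order, overwrite in place)
def pvToDict (arg1 : List (String × String)) : PySem.Dict String String :=
  arg1.foldl (fun d p => d.insert p.1 p.2) ∅

-- shared by both ports: Python's str() of a list of ints, e.g. "[0, 1]"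
def pvStrIntList (xs : List Int) : String :=
  "[" ++ PySem.Str.join ", " (xs.map PySem.Int.toStr) ++ "]"

-- A's nine-way slice comparison, verbatim
def cleaveCond (text : String) (count : Int) : Bool :=
  PySem.Str.slice text (some count) (some (count+2)) == "KK" ||
  PySem.Str.slice text (some count) (some (count+2)) == "KH" ||
  PySem.Str.slice text (some count) (some (count+2)) == "KR" ||
  PySem.Str.slice text (some count) (some (count+2)) == "HK" ||
  PySem.Str.slice text (some count) (some (count+2)) == "HH" ||
  PySem.Str.slice text (some count) (some (count+2)) == "HR" ||
  PySem.Str.slice text (some count) (some (count+2)) == "RK" ||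
  PySem.Str.slice text (some count) (some (count+2)) == "RH" ||
  PySem.Str.slice text (some count) (some (count+2)) == "RR"

-- A's while loop: count = 0; while count < len(text): if …: sites.append(count); count += 1
def cleaveSitesA (text : String) : List Int :=
  (PySem.List.pyRange 0 (PySem.Str.len text) 1).foldl
    (fun sites count => if cleaveCond text count then sites ++ [count] else sites) []

-- A's for-loop over the dict: new_keys[key] = key + ' ' + str(sites)
def cleaveLoop (d : PySem.Dict String String) : PySem.Dict String String :=
  d.keys.foldl
    (fun new_keys key =>
      new_keys.insert key (key ++ " " ++ pvStrIntList (cleaveSitesA (d.getD key ""))))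
    (∅ : PySem.Dict String String)

def cleave (arg1 : List (String × String)) : List (String × String) :=
  (cleaveLoop (pvToDict arg1)).items

-- ===== PORT B =====
-- B stage 1: basic = [i for i, c in enumerate(text) if c in 'KHR']
def basicPosB (text : String) : List Int :=
  ((PySem.List.enumerate text.toList).filter (fun p => ['K','H','R'].contains p.2)).map (·.1)

-- B stage 2: sites = [p for p, q in zip(basic, basic[1:]) if q == p + 1]
def cleaveSitesB (text : String) : List Int :=
  (((basicPosB text).zip (basicPosB text).tail).filter (fun pq => pq.2 == pq.1 + 1)).map (·.1)

-- B's for-loop over the dict: new_keys[key] = key + ' ' + str(sites)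
def cleaveLoopB (d : PySem.Dict String String) : PySem.Dict String String :=
  d.keys.foldl
    (fun new_keys key =>
      new_keys.insert key (key ++ " " ++ pvStrIntList (cleaveSitesB (d.getD key ""))))
    (∅ : PySem.Dict String String)

def cleave_alt (arg1 : List (String × String)) : List (String × String) :=
  (cleaveLoopB (pvToDict arg1)).items

-- ===== PRECONDITION & SPEC =====
def Spec_cleave (arg1 : List (String × String)) (out : List (String × String)) : Prop := out = cleave_alt arg1
instance (arg1 : List (String × String)) (out : List (String × String)) : Decidable (Spec_cleave arg1 out) := by unfold Spec_cleave; infer_instance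

-- ===== CLAIM (what is proved, stated in full; the proofs are below) =====
def Claim_equal_cleave : Prop := ∀ (arg1 : List (String × String)), Dom_cleave arg1 → Spec_cleave arg1 (cleave arg1)

-- ===== LEMMAS AND PROOFS =====

-- proof-only abbreviation for the residue test
def pvBasic (c : Char) : Bool := ['K','H','R'].contains c

-- abstract form of B's stage 1: positions (from n) of basic residues
def pvBn (n : Int) : List Char → List Int
  | [] => []
  | c :: cs => (if pvBasic c then [n] else []) ++ pvBn (n+1) cs

-- abstract form of A's search: positions (from n) of basic dipeptides
def pvPn (n : Int) : List Char → List Int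
  | [] => []
  | [_] => []
  | c :: d :: cs => (if pvBasic c && pvBasic d then [n] else []) ++ pvPn (n+1) (d :: cs)

-- abstract form of B's stage 2
def pvS (l : List Int) : List Int :=
  ((l.zip l.tail).filter (fun pq => pq.2 == pq.1 + 1)).map (·.1)

-- intermediate form: A's sites as a single filtered pairwise scan
def pvPairSites (text : String) : List Int :=
  ((PySem.List.enumerate (text.toList.zip text.toList.tail)).filter
    (fun p => ['K','H','R'].contains p.2.1 && ['K','H','R'].contains p.2.2)).map (·.1)

-- String equality test reduces to equality of the character lists
theorem pv_str_beq (s t : String) : (s == t) = (s.toList == t.toList) := by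
  simp [String.ext_iff]

-- the nine-way comparison of a two-character list equals the two membership tests
theorem pv_pair_cond (a b : Char) :
    (([a,b] == ['K','K']) || ([a,b] == ['K','H']) || ([a,b] == ['K','R']) ||
     ([a,b] == ['H','K']) || ([a,b] == ['H','H']) || ([a,b] == ['H','R']) ||
     ([a,b] == ['R','K']) || ([a,b] == ['R','H']) || ([a,b] == ['R','R']))
    = (['K','H','R'].contains a && ['K','H','R'].contains b) := by
  rw [Bool.eq_iff_iff]
  simp
  tauto

-- an in-range slice text[k:k+2] is the two characters at k and k+1
theorem pv_slice2 (t : String) (k : Nat) (h : k + 1 < t.toList.length) :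
    (PySem.Str.slice t (some (k:Int)) (some ((k:Int)+2))).toList
      = [t.toList[k], t.toList[k+1]] := by
  rw [PySem.Str.toList_slice]
  rw [show ((k:Int)+2) = ((k:Int) + ((2:Nat):Int)) from by push_cast; ring]
  show PySem.List.slice t.toList (some (k:Int)) (some ((k:Int) + ((2:Nat):Int))) = _
  rw [PySem.List.slice_natCast_add t.toList k 2]
  have e1 : List.drop k t.toList
      = t.toList[k] :: (t.toList[k+1] :: List.drop (k+1+1) t.toList) := by
    rw [List.drop_eq_getElem_cons (show k < _ by omega)]
    congr 1
    rw [List.drop_eq_getElem_cons (show k+1 < _ by omega)]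
  rw [e1]
  rfl

theorem pv_cond_at (t : String) (k : Nat) (h : k + 1 < t.toList.length) :
    cleaveCond t (k:Int)
      = (['K','H','R'].contains t.toList[k] && ['K','H','R'].contains t.toList[k+1]) := by
  unfold cleaveCond
  simp only [pv_str_beq, pv_slice2 t k h]
  rw [show ("KK":String).toList = ['K','K'] from by decide,
      show ("KH":String).toList = ['K','H'] from by decide,
      show ("KR":String).toList = ['K','R'] from by decide,
      show ("HK":String).toList = ['H','K'] from by decide,
      show ("HH":String).toList = ['H','H'] from by decide,
      show ("HR":String).toList = ['H','R'] from by decide,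
      show ("RK":String).toList = ['R','K'] from by decide,
      show ("RH":String).toList = ['R','H'] from by decide,
      show ("RR":String).toList = ['R','R'] from by decide]
  exact pv_pair_cond _ _

-- at the last index the slice has a single character and never matches
theorem pv_cond_last (t : String) (m : Nat) (h : t.toList.length = m + 1) :
    cleaveCond t (m:Int) = false := by
  unfold cleaveCond
  simp only [pv_str_beq]
  rw [show ((m:Int)+2) = ((m:Int) + ((2:Nat):Int)) from by push_cast; ring]
  have e1 : (PySem.Str.slice t (some (m:Int)) (some ((m:Int) + ((2:Nat):Int)))).toList
      = [t.toList[m]'(by omega)] := by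
    rw [PySem.Str.toList_slice]
    show PySem.List.slice t.toList (some (m:Int)) (some ((m:Int) + ((2:Nat):Int))) = _
    rw [PySem.List.slice_natCast_add t.toList m 2]
    rw [List.drop_eq_getElem_cons (by omega)]
    rw [List.drop_eq_nil_of_le (by omega)]
    simp
  rw [e1]
  simp

-- A's index loop finds exactly the filtered adjacent pairs
theorem pv_sitesA_pair (t : String) : cleaveSitesA t = pvPairSites t := by
  unfold cleaveSitesA pvPairSites
  rw [PySem.Str.len_eq]
  rw [PySem.List.foldl_append_if (cleaveCond t) (fun c => c)]
  rw [PySem.List.enumerate_eq_map_pyRange (t.toList.zip t.toList.tail) ('A','A')]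
  rw [List.filter_map, List.map_map]
  simp only [List.nil_append, List.map_id', Function.comp_def]
  set cs := t.toList with hcs
  have hzlen : (cs.zip cs.tail).length = cs.length - 1 := by
    rw [List.length_zip, List.length_tail]; omega
  cases hn : cs.length with
  | zero =>
    have hce : cs = [] := List.length_eq_zero_iff.mp hn
    rw [hce]
    simp [PySem.List.pyRange_one_eq_nil, PySem.List.len]
  | succ m =>
    have hlen2 : PySem.List.len (cs.zip cs.tail) = (m:Int) := by
      simp [PySem.List.len_eq, hzlen, hn]
    rw [hlen2]
    have hsplit : PySem.List.pyRange 0 ((m:Int)+1) 1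
        = PySem.List.pyRange 0 (m:Int) 1 ++ [(m:Int)] := by
      rw [PySem.List.pyRange_one_succ_right (by positivity)]
    rw [show (((m+1:Nat)) : Int) = (m:Int)+1 from by push_cast; ring, hsplit, List.filter_append]
    rw [show List.filter (cleaveCond t) [(m:Int)] = [] from by
      simp [List.filter, pv_cond_last t m (hcs ▸ hn)]]
    rw [List.append_nil]
    refine List.filter_congr (fun j hj => ?_)
    have hjm := PySem.List.mem_pyRange_one.mp hj
    obtain ⟨k, rfl⟩ : ∃ k : Nat, j = (k:Int) :=
      ⟨j.toNat, (Int.toNat_of_nonneg hjm.1).symm⟩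
    have hk : k < m := by exact_mod_cast hjm.2
    have hk1 : k + 1 < cs.length := by omega
    rw [pv_cond_at t k (hcs ▸ hk1)]
    have hkz : k < (cs.zip cs.tail).length := by omega
    simp only [PySem.List.pyGetD_natCast, List.getD_eq_getElem?_getD,
      List.getElem?_eq_getElem hkz, Option.getD_some, List.getElem_zip, List.getElem_tail]
    rfl

-- a filtered-map over a cons, written as an if-append (used by the abstraction lemmas)
theorem pv_map_filter_cons {A B : Type} (p : A -> Bool) (f : A -> B) (x : A) (l : List A) :
    ((x :: l).filter p).map f = (if p x then [f x] else []) ++ (l.filter p).map f := by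
  rw [List.filter_cons]; split <;> simp

-- the pairwise scan in abstract form
theorem pv_pair_abs (cs : List Char) (s : Int) :
    ((PySem.List.enumerate (cs.zip cs.tail) s).filter
      (fun p => pvBasic p.2.1 && pvBasic p.2.2)).map (fun x => x.1) = pvPn s cs := by
  induction cs generalizing s with
  | nil => simp [pvPn, PySem.List.enumerate_nil]
  | cons c cs ih =>
    cases cs with
    | nil => simp [pvPn, PySem.List.enumerate_nil]
    | cons d cs' =>
      have hz : (c :: d :: cs').zip (c :: d :: cs').tail
          = (c, d) :: ((d :: cs').zip (d :: cs').tail) := rfl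
      rw [hz, PySem.List.enumerate_cons, pv_map_filter_cons, ih (s+1)]
      simp only [pvPn]

-- B's stage 1 in abstract form
theorem pv_basic_abs (cs : List Char) (s : Int) :
    ((PySem.List.enumerate cs s).filter (fun p => pvBasic p.2)).map (fun x => x.1)
    = pvBn s cs := by
  induction cs generalizing s with
  | nil => simp [pvBn, PySem.List.enumerate_nil]
  | cons c cs ih =>
    rw [PySem.List.enumerate_cons, pv_map_filter_cons, ih (s+1)]
    simp only [pvBn]

-- every position reported from n on is at least n
theorem pv_bn_lb (cs : List Char) (n : Int) : forall x, x ∈ pvBn n cs -> n <= x := by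
  induction cs generalizing n with
  | nil => simp [pvBn]
  | cons c cs ih =>
    intro x hx
    simp only [pvBn] at hx
    rcases List.mem_append.mp hx with h | h
    · split at h <;> simp_all
    · have := ih (n+1) x h; omega

-- B's stage 2 over a list with at least two entries
theorem pv_S_cons2 (a b : Int) (l : List Int) :
    pvS (a :: b :: l) = (if b == a + 1 then [a] else []) ++ pvS (b :: l) := by
  have hz : (a :: b :: l).zip (a :: b :: l).tail
      = (a, b) :: ((b :: l).zip (b :: l).tail) := rfl
  unfold pvS
  rw [hz, pv_map_filter_cons]

-- the core: reading consecutive entries off the basic-position list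
-- finds exactly the dipeptide positions
theorem pv_S_Bn (cs : List Char) (n : Int) : pvS (pvBn n cs) = pvPn n cs := by
  induction cs generalizing n with
  | nil => rfl
  | cons c cs ih =>
    have ebn : pvBn n (c :: cs) = (if pvBasic c then [n] else []) ++ pvBn (n+1) cs := by
      simp only [pvBn]
    cases cs with
    | nil =>
      rw [ebn]
      by_cases hc : pvBasic c = true <;> simp [hc, pvBn, pvPn, pvS]
    | cons d cs' =>
      have ebn2 : pvBn (n+1) (d :: cs')
          = (if pvBasic d then [n+1] else []) ++ pvBn (n+1+1) cs' := by
        simp only [pvBn]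
      have epn : pvPn n (c :: d :: cs')
          = (if pvBasic c && pvBasic d then [n] else []) ++ pvPn (n+1) (d :: cs') := by
        simp only [pvPn]
      by_cases hc : pvBasic c = true
      · by_cases hd : pvBasic d = true
        · have e3 : pvBn (n+1) (d :: cs') = (n+1) :: pvBn (n+1+1) cs' := by
            rw [ebn2, hd]; rfl
          rw [ebn, hc, epn, hc, hd, if_pos rfl, e3]
          simp only [List.singleton_append]
          rw [pv_S_cons2]
          have hbeq : ((n+1 : Int) == n + 1) = true := by simp
          rw [hbeq, if_pos rfl, ← e3, ih (n+1)]
          rfl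
        · have hd' : pvBasic d = false := by simpa using hd
          have e3 : pvBn (n+1) (d :: cs') = pvBn (n+1+1) cs' := by
            rw [ebn2, hd']; rfl
          have hskip : pvS (n :: pvBn (n+1+1) cs') = pvS (pvBn (n+1+1) cs') := by
            cases hbb : pvBn (n+1+1) cs' with
            | nil => rfl
            | cons x l =>
              have hx : n + 1 + 1 <= x :=
                pv_bn_lb cs' (n+1+1) x (by rw [hbb]; exact List.mem_cons_self)
              rw [pv_S_cons2]
              have hne : (x == n + 1) = false := by
                simp only [beq_eq_false_iff_ne]; omega
              rw [hne]
              rfl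
          rw [ebn, hc, epn, hc, hd', if_pos rfl]
          simp only [List.singleton_append, Bool.and_false, Bool.false_eq_true, if_false,
            List.nil_append]
          rw [e3, hskip, ← e3, ih (n+1)]
      · have hc' : pvBasic c = false := by simpa using hc
        have e1 : pvBn n (c :: d :: cs') = pvBn (n+1) (d :: cs') := by
          rw [ebn, hc']; rfl
        have e2 : pvPn n (c :: d :: cs') = pvPn (n+1) (d :: cs') := by
          rw [epn, hc']; rfl
        rw [e1, e2, ih (n+1)]

-- the per-sequence result: A's index loop equals B's staged computation
theorem pv_sites_eq (t : String) : cleaveSitesA t = cleaveSitesB t := by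
  have h1 : pvPairSites t = pvPn 0 t.toList := pv_pair_abs t.toList 0
  have h2 : basicPosB t = pvBn 0 t.toList := pv_basic_abs t.toList 0
  have h3 : cleaveSitesB t = pvS (basicPosB t) := rfl
  rw [pv_sitesA_pair, h1, h3, h2, pv_S_Bn]

-- dict level: the two insert loops over the same keys agree entrywise
theorem pv_loop_eq (d : PySem.Dict String String) : cleaveLoop d = cleaveLoopB d := by
  unfold cleaveLoop cleaveLoopB
  apply PySem.List.foldl_congr_mem
  intro acc key _
  rw [pv_sites_eq]

theorem pv_cleave_eq (arg1 : List (String × String)) : cleave arg1 = cleave_alt arg1 := by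
  unfold cleave cleave_alt
  rw [pv_loop_eq]

-- ===== VERDICT (by name: the statement is the Claim_ definition above) =====
theorem cleave_spec : Claim_equal_cleave := by
  intro arg1 _
  unfold Spec_cleave
  exact pv_cleave_eq arg1
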